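-- pv_equiv track=rewrite | github.com/pratapbhanu022-wq/Probloems_Solved | programiz/medium/broken_keyboard_again_hhh.py | type_with_broken_keyboard
-- ===== SOURCE A (Python) =====
-- def type_with_broken_keyboard(word):
--     result=""
--     vowels="AEIOUaeiou"
--     lowercase=True
--     for char in word:
--         if char in vowels:
--             lowercase=not lowercase
--         if lowercase:
--             result+=char.lower()
--         else:
--             result+=char.upper()
--
--     return result
-- ===== SOURCE B (Python) =====
-- def type_with_broken_keyboard(word):
--     vowels = set("AEIOUaeiou")
--     counts = []
--     total = 0
--     for ch in word:
--         if ch in vowels: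
--             total += 1
--         counts.append(total)
--     return "".join(c.lower() if k % 2 == 0 else c.upper() for c, k in zip(word, counts))
-- ===== Notes on version B (the rewrite author's own statement) =====
-- stated objective: alternative
-- what changed: Replaces the fused toggle-and-append loop with a two-phase decomposition: first build a prefix table of cumulative vowel counts, then map each character to lower/upper by the parity of its count and join.
import Mathlib
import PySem

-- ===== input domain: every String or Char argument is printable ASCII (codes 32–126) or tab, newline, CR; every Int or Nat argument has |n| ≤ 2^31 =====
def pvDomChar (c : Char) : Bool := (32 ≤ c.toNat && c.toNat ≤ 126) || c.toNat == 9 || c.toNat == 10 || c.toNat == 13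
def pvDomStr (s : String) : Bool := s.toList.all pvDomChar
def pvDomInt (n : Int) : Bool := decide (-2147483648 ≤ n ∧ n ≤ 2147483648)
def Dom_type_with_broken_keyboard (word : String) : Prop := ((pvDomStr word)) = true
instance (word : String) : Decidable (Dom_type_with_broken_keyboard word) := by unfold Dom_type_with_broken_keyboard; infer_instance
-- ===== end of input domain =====

-- B replaces A's fused toggle-and-append loop with a prefix table of cumulative vowel counts
-- followed by a separate parity-driven case map (alternative decomposition, same cost class).


-- ===== PORT A =====
-- A's loop: state is (result so far, lowercase flag); toggle on vowel, then append cased char.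
def tbkLoopA : List Char → List Char → Bool → List Char
  | [], result, _ => result
  | c :: rest, result, lowercase =>
    let lowercase' := if ("AEIOUaeiou".toList).contains c then !lowercase else lowercase
    tbkLoopA rest
      (result ++ [if lowercase' then PySem.Chars.lowerChar c else PySem.Chars.upperChar c])
      lowercase'

def type_with_broken_keyboard (word : String) : String :=
  String.ofList (tbkLoopA word.toList [] true)

-- ===== PORT B =====
def tbkVowels : PySem.Set Char := PySem.Set.ofList "AEIOUaeiou".toList

-- phase 1: prefix table of cumulative vowel counts (count includes the current char)
def tbkCounts : List Char → Nat → List Nat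
  | [], _ => []
  | c :: rest, total =>
    let total' := if tbkVowels.contains c then total + 1 else total
    total' :: tbkCounts rest total'

def type_with_broken_keyboard_alt (word : String) : String :=
  String.ofList ((word.toList.zip (tbkCounts word.toList 0)).map
    (fun ck => if ck.2 % 2 = 0 then PySem.Chars.lowerChar ck.1 else PySem.Chars.upperChar ck.1))

-- ===== PRECONDITION & SPEC =====
def Spec_type_with_broken_keyboard (word : String) (out : String) : Prop := out = type_with_broken_keyboard_alt word
instance (word : String) (out : String) : Decidable (Spec_type_with_broken_keyboard word out) := by unfold Spec_type_with_broken_keyboard; infer_instance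

-- ===== CLAIM (what is proved, stated in full; the proofs are below) =====
def Claim_equal_type_with_broken_keyboard : Prop := ∀ (word : String), Dom_type_with_broken_keyboard word → Spec_type_with_broken_keyboard word (type_with_broken_keyboard word)

-- ===== LEMMAS AND PROOFS =====

-- the two vowel tests agree (the deduplicated set equals the literal list)
lemma tbkVowels_eq : tbkVowels = "AEIOUaeiou".toList := by decide

-- loop ↔ table correspondence: the lowercase flag is the evenness of the running count
lemma tbkFlag (t : Nat) : (!decide (t % 2 = 0)) = decide ((t + 1) % 2 = 0) := by
  by_cases h : t % 2 = 0 <;> simp [h, Nat.add_mod] <;> omega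

-- loop ↔ table correspondence: the lowercase flag is the evenness of the running count
lemma tbkLoopA_eq_map : ∀ (cs : List Char) (res : List Char) (t : Nat),
    tbkLoopA cs res (decide (t % 2 = 0)) =
      res ++ ((cs.zip (tbkCounts cs t)).map
        (fun ck => if ck.2 % 2 = 0 then PySem.Chars.lowerChar ck.1 else PySem.Chars.upperChar ck.1)) := by
  intro cs
  induction cs with
  | nil => intro res t; simp [tbkLoopA, tbkCounts]
  | cons c rest ih =>
    intro res t
    rw [tbkLoopA, tbkCounts]
    simp only [PySem.Set.contains_eq_listContains, tbkVowels_eq]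
    cases hv : ("AEIOUaeiou".toList).contains c <;>
      simp only [hv, Bool.false_eq_true, if_true, if_false, ite_true,
        ite_false] <;>
      simp [tbkFlag, ih]

-- ===== VERDICT (by name: the statement is the Claim_ definition above) =====
theorem type_with_broken_keyboard_spec : Claim_equal_type_with_broken_keyboard := by
  intro word _
  show type_with_broken_keyboard word = type_with_broken_keyboard_alt word
  have h := tbkLoopA_eq_map word.toList [] 0
  simp only [Nat.zero_mod, decide_true] at h
  simp [type_with_broken_keyboard, type_with_broken_keyboard_alt, h]
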